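-- pv_equiv track=rewrite | github.com/rubences/EjerciciosParcial22_23 | Ejercicio2.py | imprimir_2
-- ===== SOURCE A (Python) =====
-- def imprimir_2(lista):
--     multiplos2 = []
--     for n in lista:
--         if n > 300:
--             break
--         if n % 10 == 0 and n < 200:
--             multiplos2.append(n)
--     return multiplos2
-- ===== SOURCE B (Python) =====
-- def imprimir_2(lista):
--     # Phase 1: index scan to find the stop position (first element > 300).
--     stop = 0
--     largo = len(lista)
--     while stop < largo and lista[stop] <= 300:
--         stop += 1
--     # Phase 2: walk the prefix BACKWARDS by index, collecting matches,
--     # then reverse once to restore the original order.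
--     resultado = []
--     while stop:
--         stop -= 1
--         n = lista[stop]
--         if n % 10 == 0 and n < 200:
--             resultado.append(n)
--     resultado.reverse()
--     return resultado
-- ===== Notes on version B (the rewrite author's own statement) =====
-- stated objective: alternative
-- what changed: Replaces the single break-and-append forward loop with two index-driven phases: a while-loop that locates the stop position (first element > 300), then a backward index walk over that prefix collecting matches in reverse followed by one reversal.
import Mathlib
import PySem

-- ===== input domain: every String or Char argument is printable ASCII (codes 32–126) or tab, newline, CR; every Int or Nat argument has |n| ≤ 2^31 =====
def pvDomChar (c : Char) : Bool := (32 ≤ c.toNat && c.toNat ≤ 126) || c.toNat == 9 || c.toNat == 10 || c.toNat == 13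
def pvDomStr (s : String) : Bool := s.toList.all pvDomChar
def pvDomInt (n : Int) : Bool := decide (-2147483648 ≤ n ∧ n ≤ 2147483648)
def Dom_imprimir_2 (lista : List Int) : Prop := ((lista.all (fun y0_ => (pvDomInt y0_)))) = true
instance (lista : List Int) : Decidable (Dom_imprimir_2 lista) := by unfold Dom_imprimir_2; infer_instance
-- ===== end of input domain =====

-- B replaces A's break-and-append forward loop with an index scan for the stop position plus a
-- backward index walk collecting matches in reverse, finished by one reversal (alternative decomposition).


-- ===== PORT A =====
-- A's for-loop with break and an accumulator list, as structural recursion over the list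
def imprimir2Loop (lista : List Int) (multiplos2 : List Int) : List Int :=
  match lista with
  | [] => multiplos2
  | n :: rest =>
    if n > 300 then multiplos2
    else if PySem.Int.mod n 10 = 0 ∧ n < 200 then imprimir2Loop rest (multiplos2 ++ [n])
    else imprimir2Loop rest multiplos2

def imprimir_2 (lista : List Int) : List Int := imprimir2Loop lista []

-- ===== PORT B =====
-- B's phase 1: 'while stop < largo and lista[stop] <= 300: stop += 1' (fuel = remaining indices)
def imprimir2AltStop (lista : List Int) (stop : Nat) (fuel : Nat) : Nat :=
  match fuel with
  | 0 => stop
  | fuel + 1 =>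
    if stop < lista.length ∧ ((PySem.List.pyGet? lista (stop : Int)).getD 0) ≤ 300 then
      imprimir2AltStop lista (stop + 1) fuel
    else stop

-- B's phase 2: 'while stop: stop -= 1; n = lista[stop]; if …: resultado.append(n)'
def imprimir2AltBack (lista : List Int) (stop : Nat) (resultado : List Int) : List Int :=
  match stop with
  | 0 => resultado
  | s + 1 =>
    let n := (PySem.List.pyGet? lista (s : Int)).getD 0
    if PySem.Int.mod n 10 = 0 ∧ n < 200 then imprimir2AltBack lista s (resultado ++ [n])
    else imprimir2AltBack lista s resultado

def imprimir_2_alt (lista : List Int) : List Int :=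
  (imprimir2AltBack lista (imprimir2AltStop lista 0 lista.length) []).reverse

-- ===== PRECONDITION & SPEC =====
def Spec_imprimir_2 (lista : List Int) (out : List Int) : Prop := out = imprimir_2_alt lista
instance (lista : List Int) (out : List Int) : Decidable (Spec_imprimir_2 lista out) := by unfold Spec_imprimir_2; infer_instance

-- ===== CLAIM (what is proved, stated in full; the proofs are below) =====
def Claim_equal_imprimir_2 : Prop := ∀ (lista : List Int), Dom_imprimir_2 lista → Spec_imprimir_2 lista (imprimir_2 lista)

-- ===== LEMMAS AND PROOFS =====
-- the common mathematical value both ports compute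
def imprimir2Spec (lista : List Int) : List Int :=
  (lista.takeWhile (fun n => n ≤ 300)).filter (fun n => PySem.Int.mod n 10 == 0 && n < 200)

theorem imprimir2Loop_eq (lista acc : List Int) :
    imprimir2Loop lista acc = acc ++ imprimir2Spec lista := by
  induction lista generalizing acc with
  | nil => simp [imprimir2Loop, imprimir2Spec]
  | cons n rest ih =>
    simp only [imprimir2Loop, imprimir2Spec]
    by_cases h1 : n > 300
    · simp [List.takeWhile, h1, show ¬ n ≤ 300 by omega]
    · have h1' : n ≤ 300 := by omega
      rw [if_neg h1]
      have htw : List.takeWhile (fun n => decide (n ≤ 300)) (n :: rest)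
          = n :: List.takeWhile (fun n => decide (n ≤ 300)) rest := by
        simp [List.takeWhile, h1']
      have hdvd := PySem.Int.mod_eq_zero_iff_dvd n 10
      by_cases h2 : PySem.Int.mod n 10 = 0 ∧ n < 200
      · rw [if_pos h2, ih]
        simp [imprimir2Spec, htw, hdvd.mp h2.1, h2.2]
      · rw [if_neg h2, ih]
        simp only [imprimir2Spec, htw, List.filter_cons]
        have hnp : ¬ ((10:Int) ∣ n ∧ n < 200) := fun ⟨hd, hlt⟩ => h2 ⟨hdvd.mpr hd, hlt⟩
        rcases not_and_or.mp hnp with h | h <;> simp [h]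

theorem imprimir2AltStop_eq (lista : List Int) (fuel i : Nat)
    (hf : lista.length - i ≤ fuel) :
    imprimir2AltStop lista i fuel = i + ((lista.drop i).takeWhile (fun n => n ≤ 300)).length := by
  induction fuel generalizing i with
  | zero =>
    have : lista.length ≤ i := by omega
    simp [imprimir2AltStop, List.drop_eq_nil_of_le this]
  | succ fuel ih =>
    simp only [imprimir2AltStop]
    by_cases hi : i < lista.length
    · have hdrop : lista.drop i = lista[i] :: lista.drop (i + 1) :=
        List.drop_eq_getElem_cons hi
      have hget : (PySem.List.pyGet? lista (i : Int)).getD 0 = lista[i] := by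
        rw [PySem.List.pyGet?_natCast]
        simp [hi]
      by_cases hle : lista[i] ≤ 300
      · rw [if_pos ⟨hi, by rw [hget]; exact hle⟩, ih (i + 1) (by omega), hdrop]
        simp [List.takeWhile, hle]
        omega
      · rw [if_neg (by rw [hget]; exact fun h => hle h.2), hdrop]
        simp [List.takeWhile, hle]
    · rw [if_neg (fun h => hi h.1)]
      simp [List.drop_eq_nil_of_le (by omega : lista.length ≤ i)]

theorem imprimir2AltBack_eq (lista : List Int) (stop : Nat) (hs : stop ≤ lista.length)
    (out : List Int) :
    imprimir2AltBack lista stop out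
      = out ++ ((lista.take stop).filter (fun n => PySem.Int.mod n 10 == 0 && n < 200)).reverse := by
  induction stop generalizing out with
  | zero => simp [imprimir2AltBack]
  | succ s ih =>
    have hslt : s < lista.length := by omega
    have hget : (PySem.List.pyGet? lista (s : Int)).getD 0 = lista[s] := by
      rw [PySem.List.pyGet?_natCast]
      simp [hslt]
    have htake : lista.take (s + 1) = lista.take s ++ [lista[s]] :=
      List.take_succ_eq_append_getElem hslt
    have hdvd := PySem.Int.mod_eq_zero_iff_dvd (lista[s]) 10
    simp only [imprimir2AltBack, hget, htake, List.filter_append, List.filter_cons,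
      List.filter_nil, List.reverse_append]
    by_cases h2 : PySem.Int.mod lista[s] 10 = 0 ∧ lista[s] < 200
    · rw [if_pos h2, ih (by omega)]
      simp [hdvd.mp h2.1, h2.2]
    · rw [if_neg h2, ih (by omega)]
      have hnp : ¬ ((10:Int) ∣ lista[s] ∧ lista[s] < 200) := fun ⟨hd, hlt⟩ => h2 ⟨hdvd.mpr hd, hlt⟩
      rcases not_and_or.mp hnp with h | h <;> simp [h]

theorem takeWhile_length_le {α : Type} (p : α → Bool) (l : List α) :
    (l.takeWhile p).length ≤ l.length := by
  induction l with
  | nil => simp [List.takeWhile]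
  | cons a l ih =>
    simp only [List.takeWhile]
    cases p a <;> simp; omega

theorem take_takeWhile_length {α : Type} (p : α → Bool) (l : List α) :
    l.take (l.takeWhile p).length = l.takeWhile p := by
  induction l with
  | nil => simp
  | cons a l ih =>
    simp only [List.takeWhile]
    cases p a <;> simp [ih]

theorem imprimir2Alt_eq (lista : List Int) : imprimir_2_alt lista = imprimir2Spec lista := by
  unfold imprimir_2_alt
  have hstop : imprimir2AltStop lista 0 lista.length
      = (lista.takeWhile (fun n => n ≤ 300)).length := by
    simpa using imprimir2AltStop_eq lista lista.length 0 (by omega)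
  rw [hstop,
    imprimir2AltBack_eq lista _ (takeWhile_length_le _ _) [],
    List.nil_append, List.reverse_reverse, take_takeWhile_length]
  rfl

-- ===== VERDICT (by name: the statement is the Claim_ definition above) =====
theorem imprimir_2_spec : Claim_equal_imprimir_2 := by
  intro lista _
  unfold Spec_imprimir_2 imprimir_2
  rw [imprimir2Loop_eq, imprimir2Alt_eq, List.nil_append]
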